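-- pv_equiv track=rewrite | github.com/roytian1992/NarrativeKnowledgeWeaver | core/builder/event_processor.py | _maximal_chain_indices_by_set
-- ===== SOURCE A (Python) =====
-- from typing import List, Dict, Tuple, Optional, Any, Set, Callable
-- from collections import defaultdict, Counter
--
-- def _maximal_chain_indices_by_set(chains: List[List[str]], min_length: int = 2) -> List[int]:
--     """
--     Return indices of chains that are maximal by set inclusion among chains
--     with length >= min_length.
--
--     Args:
--         chains: List of chains.
--         min_length: Minimum chain length to consider.
--
--     Returns:
--         Indices into `chains` that correspond to maximal sets.
--     """
--     idxs = [i for i, ch in enumerate(chains) if len(ch) >= min_length]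
--     sets = [set(chains[i]) for i in idxs]
--     inv = defaultdict(set)
--     order = sorted(range(len(idxs)), key=lambda k: -len(sets[k]))
--     kept_local = []
--     kept_sets = []
--     for k in order:
--         s = sets[k]
--         if not s:
--             if any(len(ts) > 0 for ts in kept_sets):
--                 continue
--             kept_idx = len(kept_sets)
--             kept_local.append(k)
--             kept_sets.append(s)
--             continue
--         sig = sorted(s, key=lambda e: len(inv[e]))
--         cand = inv[sig[0]].copy() if sig else set()
--         for e in sig[1:]:
--             cand &= inv[e]
--             if not cand:
--                 break
--         has_strict_superset = any(len(kept_sets[j]) > len(s) for j in cand)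
--         if has_strict_superset:
--             continue
--         kept_idx = len(kept_sets)
--         kept_local.append(k)
--         kept_sets.append(s)
--         for e in s:
--             inv[e].add(kept_idx)
--     return [idxs[k] for k in kept_local]
-- ===== SOURCE B (Python) =====
-- def _maximal_chain_indices_by_set(chains, min_length=2):
--     idxs = [i for i, ch in enumerate(chains) if len(ch) >= min_length]
--     sets = [set(chains[i]) for i in idxs]
--     order = sorted(range(len(idxs)), key=lambda k: -len(sets[k]))
--     kept_local = []
--     kept_sets = []
--     for k in order:
--         s = sets[k]
--         if not any(len(t) > len(s) and s <= t for t in kept_sets):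
--             kept_local.append(k)
--             kept_sets.append(s)
--     return [idxs[k] for k in kept_local]
-- ===== Notes on version B (the rewrite author's own statement) =====
-- stated objective: simpler
-- what changed: Drops the inverted posting-list index, per-set sorted signature, pruned intersection and the special empty-set branch in favour of one direct linear scan of the already-kept sets with a strict-superset (subset + longer) test.
import Mathlib
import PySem

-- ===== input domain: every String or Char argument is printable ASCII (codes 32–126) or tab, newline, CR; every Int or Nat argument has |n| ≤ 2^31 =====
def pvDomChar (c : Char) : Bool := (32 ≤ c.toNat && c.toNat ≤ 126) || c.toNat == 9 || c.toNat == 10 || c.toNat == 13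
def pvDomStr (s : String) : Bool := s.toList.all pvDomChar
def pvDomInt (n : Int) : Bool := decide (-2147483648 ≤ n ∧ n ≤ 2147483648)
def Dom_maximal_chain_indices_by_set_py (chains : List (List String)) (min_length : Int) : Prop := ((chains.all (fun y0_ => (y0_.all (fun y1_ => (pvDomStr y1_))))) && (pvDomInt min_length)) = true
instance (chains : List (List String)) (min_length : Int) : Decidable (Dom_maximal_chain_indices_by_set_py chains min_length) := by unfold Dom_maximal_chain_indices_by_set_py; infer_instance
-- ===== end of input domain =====

-- B replaces A's inverted index + sorted signature + pruned intersection (and the special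
-- empty-set branch) by one direct scan of the kept sets with a strict-superset test; same results.

-- ===== PORT A =====
-- cand = inv[sig[0]].copy(); for e in sig[1:]: cand &= inv[e]; if not cand: break
-- (the break is modelled by the 'if c = []' guard: once empty, further intersections are skipped,
-- which yields exactly the same set as Python's early exit)
def pvCandA (inv : PySem.Dict String (PySem.Set Int)) : List String → PySem.Set Int
  | [] => []
  | e0 :: rest =>
      rest.foldl
        (fun c e => if c = [] then c else PySem.Set.inter c (PySem.Dict.getD inv e []))
        (PySem.Dict.getD inv e0 [])

-- the main 'for k in order' loop of A; defaultdict reads inv[e] are modelled by Dict.getD inv e []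
-- (defaultdict's insertion of the default on read never changes any value A observes).
-- All list indexings (sets[k], kept_sets[j], idxs[k]) are in range whenever Python runs them,
-- so pyGetD with an unused default is exact.
def pvLoopA (sets : List (PySem.Set String)) (inv : PySem.Dict String (PySem.Set Int))
    (kept_local : List Int) (kept_sets : List (PySem.Set String)) :
    List Int → List Int
  | [] => kept_local
  | k :: rest =>
      let s := PySem.List.pyGetD sets k []
      if s = [] then
        if kept_sets.any (fun ts => decide (0 < ts.length)) then
          pvLoopA sets inv kept_local kept_sets rest
        else
          pvLoopA sets inv (kept_local ++ [k]) (kept_sets ++ [s]) rest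
      else
        let sig := PySem.List.sorted s (fun e => (PySem.Dict.getD inv e ([] : PySem.Set Int)).length) false
        let cand := pvCandA inv sig
        if cand.any (fun j => decide ((s : List String).length < (PySem.List.pyGetD kept_sets j []).length)) then
          pvLoopA sets inv kept_local kept_sets rest
        else
          pvLoopA sets
            (s.foldl (fun d e =>
                PySem.Dict.insert d e (PySem.Set.add (PySem.Dict.getD d e []) (kept_sets.length : Int))) inv)
            (kept_local ++ [k]) (kept_sets ++ [s]) rest

def maximal_chain_indices_by_set_py (chains : List (List String)) (min_length : Int) : List Int :=
  let idxs := ((PySem.List.enumerate chains 0).filter (fun p => decide (min_length ≤ (p.2.length : Int)))).map (·.1)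
  let sets := idxs.map (fun i => PySem.Set.ofList (PySem.List.pyGetD chains i []))
  let order := PySem.List.sorted (PySem.List.pyRange 0 (idxs.length : Int) 1)
      (fun k => -(((PySem.List.pyGetD sets k ([] : PySem.Set String)).length : Int))) false
  (pvLoopA sets PySem.Dict.empty [] [] order).map (fun k => PySem.List.pyGetD idxs k 0)

-- ===== PORT B =====
-- B's loop: keep k unless some already-kept set t is a strict superset of s
def pvLoopB (sets : List (PySem.Set String))
    (kept_local : List Int) (kept_sets : List (PySem.Set String)) :
    List Int → List Int
  | [] => kept_local
  | k :: rest =>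
      let s := PySem.List.pyGetD sets k []
      if kept_sets.any (fun t => decide ((s : List String).length < t.length) && PySem.Set.issubset s t) then
        pvLoopB sets kept_local kept_sets rest
      else
        pvLoopB sets (kept_local ++ [k]) (kept_sets ++ [s]) rest

def maximal_chain_indices_by_set_py_alt (chains : List (List String)) (min_length : Int) : List Int :=
  let idxs := ((PySem.List.enumerate chains 0).filter (fun p => decide (min_length ≤ (p.2.length : Int)))).map (·.1)
  let sets := idxs.map (fun i => PySem.Set.ofList (PySem.List.pyGetD chains i []))
  let order := PySem.List.sorted (PySem.List.pyRange 0 (idxs.length : Int) 1)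
      (fun k => -(((PySem.List.pyGetD sets k ([] : PySem.Set String)).length : Int))) false
  (pvLoopB sets [] [] order).map (fun k => PySem.List.pyGetD idxs k 0)

-- ===== PRECONDITION & SPEC =====
def Spec_maximal_chain_indices_by_set_py (chains : List (List String)) (min_length : Int) (out : List Int) : Prop := out = maximal_chain_indices_by_set_py_alt chains min_length
instance (chains : List (List String)) (min_length : Int) (out : List Int) : Decidable (Spec_maximal_chain_indices_by_set_py chains min_length out) := by unfold Spec_maximal_chain_indices_by_set_py; infer_instance

-- ===== CLAIM (what is proved, stated in full; the proofs are below) =====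
def Claim_equal_maximal_chain_indices_by_set_py : Prop := ∀ (chains : List (List String)) (min_length : Int), Dom_maximal_chain_indices_by_set_py chains min_length → Spec_maximal_chain_indices_by_set_py chains min_length (maximal_chain_indices_by_set_py chains min_length)

-- ===== LEMMAS AND PROOFS =====

-- invariant relating A's inverted index to the kept sets:
-- j ∈ inv[e]  iff  j is the (Int) index of a kept set containing e
def pvInv (inv : PySem.Dict String (PySem.Set Int)) (ks : List (PySem.Set String)) : Prop :=
  ∀ (e : String) (j : Int),
    j ∈ PySem.Dict.getD inv e ([] : PySem.Set Int) ↔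
      ∃ n : Nat, n < ks.length ∧ j = (n : Int) ∧ e ∈ ks.getD n []

theorem pvGetD_self_or_mem {α : Type} (xs : List α) (i : Int) (d : α) :
    PySem.List.pyGetD xs i d = d ∨ PySem.List.pyGetD xs i d ∈ xs := by
  cases h : PySem.List.pyGet? xs i with
  | none => left; simp [PySem.List.pyGetD, h]
  | some x =>
      right
      have hm := PySem.List.mem_of_pyGet?_eq_some xs h
      simpa [PySem.List.pyGetD, h] using hm

theorem pvFoldlInter_mem (inv : PySem.Dict String (PySem.Set Int)) (rest : List String) :
    ∀ (c : PySem.Set Int) (j : Int),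
      j ∈ rest.foldl (fun c e => if c = [] then c else PySem.Set.inter c (PySem.Dict.getD inv e [])) c ↔
        (j ∈ c ∧ ∀ e ∈ rest, j ∈ PySem.Dict.getD inv e ([] : PySem.Set Int)) := by
  induction rest with
  | nil => simp
  | cons a t ih =>
      intro c j
      simp only [List.foldl_cons]
      by_cases hc : c = []
      · subst hc
        rw [if_pos rfl, ih]
        simp
      · rw [if_neg hc, ih]
        simp only [PySem.Set.mem_inter, List.mem_cons]
        constructor
        · rintro ⟨⟨h1, h2⟩, h3⟩
          refine ⟨h1, fun e he => ?_⟩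
          rcases he with rfl | he
          · exact h2
          · exact h3 e he
        · rintro ⟨h1, h2⟩
          exact ⟨⟨h1, h2 a (Or.inl rfl)⟩, fun e he => h2 e (Or.inr he)⟩

theorem pvCandA_mem' (inv : PySem.Dict String (PySem.Set Int)) (sig : List String) (j : Int)
    (hne : sig ≠ []) :
    j ∈ pvCandA inv sig ↔ ∀ e ∈ sig, j ∈ PySem.Dict.getD inv e ([] : PySem.Set Int) := by
  cases sig with
  | nil => exact absurd rfl hne
  | cons e0 rest =>
      unfold pvCandA
      rw [pvFoldlInter_mem]
      simp only [List.mem_cons]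
      constructor
      · rintro ⟨h1, h2⟩ e he
        rcases he with rfl | he
        · exact h1
        · exact h2 e he
      · intro h
        exact ⟨h e0 (Or.inl rfl), fun e he => h e (Or.inr he)⟩

theorem pvInvAdd_getD (s : List String) (hs : s.Nodup) (kd : Int)
    (inv : PySem.Dict String (PySem.Set Int)) (e : String) :
    PySem.Dict.getD
        (s.foldl (fun d e => PySem.Dict.insert d e (PySem.Set.add (PySem.Dict.getD d e []) kd)) inv)
        e ([] : PySem.Set Int)
      = if e ∈ s then PySem.Set.add (PySem.Dict.getD inv e ([] : PySem.Set Int)) kd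
        else PySem.Dict.getD inv e ([] : PySem.Set Int) := by
  induction s generalizing inv with
  | nil => simp
  | cons a t ih =>
      simp only [List.nodup_cons] at hs
      simp only [List.foldl_cons]
      rw [ih hs.2]
      by_cases he : e ∈ t
      · have hea : e ≠ a := fun h => hs.1 (h ▸ he)
        simp [he, hea, PySem.Dict.getD_insert, List.mem_cons]
      · by_cases hea : e = a
        · subst hea
          simp [he]
        · simp [he, hea, PySem.Dict.getD_insert, List.mem_cons]

theorem pvInv_snoc (inv inv' : PySem.Dict String (PySem.Set Int))
    (ks : List (PySem.Set String)) (s : PySem.Set String) (hinv : pvInv inv ks)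
    (h : ∀ (e : String) (j : Int), j ∈ PySem.Dict.getD inv' e ([] : PySem.Set Int) ↔
        (j ∈ PySem.Dict.getD inv e ([] : PySem.Set Int) ∨ (e ∈ s ∧ j = (ks.length : Int)))) :
    pvInv inv' (ks ++ [s]) := by
  intro e j
  rw [h, hinv e j]
  constructor
  · rintro (⟨n, hn, rfl, he⟩ | ⟨hes, rfl⟩)
    · refine ⟨n, by simp; omega, rfl, ?_⟩
      rwa [List.getD_append _ _ _ _ hn]
    · refine ⟨ks.length, by simp, rfl, ?_⟩
      have : (ks ++ [s]).getD ks.length [] = s := by simp [List.getD]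
      rwa [this]
  · rintro ⟨n, hn, rfl, he⟩
    simp only [List.length_append, List.length_singleton] at hn
    by_cases hlt : n < ks.length
    · left
      exact ⟨n, hlt, rfl, by rwa [List.getD_append _ _ _ _ hlt] at he⟩
    · right
      have hne : n = ks.length := by omega
      subst hne
      have : (ks ++ [s]).getD ks.length [] = s := by simp [List.getD]
      rw [this] at he
      exact ⟨he, rfl⟩

theorem pvCond_iff (ks : List (PySem.Set String)) (s : PySem.Set String) :
    (ks.any (fun t => decide ((s : List String).length < t.length) && PySem.Set.issubset s t) = true) ↔
      ∃ n : Nat, n < ks.length ∧ (s : List String).length < (ks.getD n []).length ∧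
        ∀ e ∈ s, e ∈ ks.getD n [] := by
  rw [List.any_eq_true]
  constructor
  · rintro ⟨t, ht, hcond⟩
    rw [Bool.and_eq_true, decide_eq_true_eq, PySem.Set.issubset_iff] at hcond
    obtain ⟨n, hn, rfl⟩ := List.mem_iff_getElem.mp ht
    exact ⟨n, hn, by rw [List.getD_eq_getElem _ _ hn]; exact hcond.1,
      by rw [List.getD_eq_getElem _ _ hn]; exact hcond.2⟩
  · rintro ⟨n, hn, hlen, hsub⟩
    refine ⟨ks.getD n [], ?_, ?_⟩
    · rw [List.getD_eq_getElem _ _ hn]; exact List.getElem_mem hn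
    · rw [Bool.and_eq_true, decide_eq_true_eq, PySem.Set.issubset_iff]
      exact ⟨hlen, hsub⟩

theorem pvCondA_iff (inv : PySem.Dict String (PySem.Set Int)) (ks : List (PySem.Set String))
    (s : PySem.Set String) (hs : s ≠ []) (hinv : pvInv inv ks) :
    ((pvCandA inv (PySem.List.sorted s (fun e => (PySem.Dict.getD inv e ([] : PySem.Set Int)).length) false)).any
        (fun j => decide ((s : List String).length < (PySem.List.pyGetD ks j []).length)) = true) ↔
      ∃ n : Nat, n < ks.length ∧ (s : List String).length < (ks.getD n []).length ∧
        ∀ e ∈ s, e ∈ ks.getD n [] := by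
  have hsig : (PySem.List.sorted s (fun e => (PySem.Dict.getD inv e ([] : PySem.Set Int)).length) false) ≠ [] := by
    simpa [PySem.List.sorted_eq_nil_iff] using hs
  rw [List.any_eq_true]
  constructor
  · rintro ⟨j, hj, hlen⟩
    rw [pvCandA_mem' _ _ _ hsig] at hj
    have hj' : ∀ e ∈ s, j ∈ PySem.Dict.getD inv e ([] : PySem.Set Int) := by
      intro e he
      exact hj e (by rwa [PySem.List.mem_sorted])
    obtain ⟨e0, he0⟩ := List.exists_mem_of_ne_nil s hs
    obtain ⟨n, hn, rfl, _⟩ := (hinv e0 j).mp (hj' e0 he0)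
    refine ⟨n, hn, ?_, ?_⟩
    · rw [decide_eq_true_eq] at hlen
      rwa [PySem.List.pyGetD_natCast] at hlen
    · intro e he
      obtain ⟨n', _, hn'eq, he'⟩ := (hinv e _).mp (hj' e he)
      have : n' = n := by exact_mod_cast hn'eq.symm
      rwa [this] at he'
  · rintro ⟨n, hn, hlen, hsub⟩
    refine ⟨(n : Int), ?_, ?_⟩
    · rw [pvCandA_mem' _ _ _ hsig]
      intro e he
      rw [PySem.List.mem_sorted] at he
      exact (hinv e _).mpr ⟨n, hn, rfl, hsub e he⟩
    · rw [decide_eq_true_eq, PySem.List.pyGetD_natCast]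
      exact hlen
theorem pvLoop_eq (sets : List (PySem.Set String)) (hnd : ∀ s ∈ sets, List.Nodup s) :
    ∀ (order : List Int) (inv : PySem.Dict String (PySem.Set Int))
      (kl : List Int) (ks : List (PySem.Set String)),
      pvInv inv ks → pvLoopA sets inv kl ks order = pvLoopB sets kl ks order := by
  intro order
  induction order with
  | nil => intro inv kl ks _; rfl
  | cons k rest ih =>
      intro inv kl ks hinv
      rw [pvLoopA, pvLoopB]
      simp only []
      by_cases hse : PySem.List.pyGetD sets k ([] : PySem.Set String) = []
      · -- empty set branch of A
        rw [if_pos hse, hse]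
        have hbe : (List.any ks fun t =>
            decide (([] : List String).length < t.length) && PySem.Set.issubset ([] : PySem.Set String) t)
            = (List.any ks fun ts => decide (0 < ts.length)) := by
          refine List.any_congr rfl ?_
          intro t
          have hsub : PySem.Set.issubset ([] : PySem.Set String) t = true :=
            (PySem.Set.issubset_iff _ _).mpr (by simp)
          rw [hsub, Bool.and_true]
          simp
        rw [hbe]
        by_cases hc : (List.any ks fun ts => decide (0 < ts.length)) = true
        · rw [if_pos hc, if_pos hc]
          exact ih inv kl ks hinv
        · rw [if_neg hc, if_neg hc]
          exact ih inv _ (ks ++ [[]]) (pvInv_snoc inv inv ks [] hinv (fun e j => by simp))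
      · -- non-empty set branch
        rw [if_neg hse]
        have hiff := (pvCondA_iff inv ks _ hse hinv).trans (pvCond_iff ks (PySem.List.pyGetD sets k [])).symm
        by_cases hc : (List.any ks fun t =>
            decide ((PySem.List.pyGetD sets k ([] : PySem.Set String) : List String).length < t.length)
              && PySem.Set.issubset (PySem.List.pyGetD sets k ([] : PySem.Set String)) t) = true
        · rw [if_pos (hiff.mpr hc), if_pos hc]
          exact ih inv kl ks hinv
        · rw [if_neg (fun h => hc (hiff.mp h)), if_neg hc]
          apply ih
          have hnodup : (PySem.List.pyGetD sets k ([] : PySem.Set String)).Nodup := by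
            rcases pvGetD_self_or_mem sets k ([] : PySem.Set String) with h | h
            · exact absurd h hse
            · exact hnd _ h
          apply pvInv_snoc inv _ ks _ hinv
          intro e j
          rw [pvInvAdd_getD _ hnodup]
          by_cases he : e ∈ PySem.List.pyGetD sets k ([] : PySem.Set String)
          · rw [if_pos he, PySem.Set.mem_add]
            constructor
            · rintro (h | rfl)
              · exact Or.inl h
              · exact Or.inr ⟨he, rfl⟩
            · rintro (h | ⟨_, rfl⟩)
              · exact Or.inl h
              · exact Or.inr rfl
          · rw [if_neg he]
            constructor
            · exact Or.inl
            · rintro (h | ⟨hes, _⟩)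
              · exact h
              · exact absurd hes he

-- ===== VERDICT (by name: the statement is the Claim_ definition above) =====
theorem maximal_chain_indices_by_set_py_spec : Claim_equal_maximal_chain_indices_by_set_py := by
  intro chains min_length _
  unfold Spec_maximal_chain_indices_by_set_py
  simp only [maximal_chain_indices_by_set_py, maximal_chain_indices_by_set_py_alt]
  apply congrArg
  apply pvLoop_eq
  · intro s hs
    rcases List.mem_map.mp hs with ⟨i, _, rfl⟩
    exact PySem.Set.nodup_ofList _
  · intro e j
    simp [PySem.Dict.getD_empty]
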